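-- pv_equiv track=rewrite | github.com/HPestock/BFC-SUITE | BFC-ASM-PY.py | getrepldct
-- ===== SOURCE A (Python) =====
-- repldct = [
-- ["setup n",">-<{n}><+[<+]+<"], #//setup (final allocated memory index): initializes memory format
-- ["set c x","{c}>[-]+{x}+{c}<"], #//set (cell) (value): sets cell (cell) to (value)
-- ["mvr c","{c}>"],#//mvr (amt): move pointer right by (amt)
-- ["dec c x","{c}>{x}-{c}<"],#//dec (cell) (amt): decrements cell (cell) by (amt)
-- ["inc c x","{c}>{x}+{c}<"],#//inc (cell) (amt): increments cell (cell) by (amt)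
-- ["goto c","[<]{c}>"],#//goto (cell): sets pointer to (cell)
-- ["gotof_ncz c","<[<]{c}>"],#//gotof_ncz (cell): sets pointer to (cell), do not use if at cell 0
-- ["mv i o","{o}>[-]+{o}<{i}>-[-{i}<{o}>+{o}<{i}>]+{i}<"],#//mv (input cell) (output cell): sets cell (output cell) to value at (input cell), then sets value at (input cell) to 0
-- ["printaz char","{char}+.[-]"],#//printaz (character number): prints character with numerical code (character number), use when at cell 0
-- ["printanz char","{char}+.[-]+"],#//printanz (character number): prints character with numerical code (character number), use when not at cell 0
-- ["getchar store","{store}>,+{store}<"],#//getchar (cell): stores input char at cell (cell)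
-- ["loop x","{x}>-[+{x}<"],#//loop (cell): start of loop, will halt when value at (cell) is 0; make sure value at (cell) is not 0 or -1, otherwise issues will occur
-- ["endloop x","{x}>-]+{x}<"],#//endloop (cell): end of loop, will halt and continue if value at (cell) is 0, otherwise jumps to start of loop
-- ["if x","{x}>-[+{x}<"],#//if (cell): start of if statement, will execute if value at (cell) is not 0
-- ["endif x","{x}>[-]]+{x}<"],#//endif (cell): end of if statement (cell)
-- ["inv ct cs w","{cs}>[-]++{cs}<{w}>[-]+{w}<{ct}>-[+{ct}<{w}>[-]++{w}<{cs}>[-]+{cs}<{ct}>[-]][-]+{ct}<{w}>-[-{w}<{ct}>+{ct}<{w}>]+{w}<"],#//inv (cell i) (cell p) (cell w): if (cell i) is equal to 0 will set (cell i) to 0 and (cell p) to 1, if (cell i) is equal to 1 will set (cell i) to 1 and (cell p) to 0, uses (cell w) for temporary calculation memory allocation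
-- ["mvtr i o","{i}>-[-{i}<{o}>+{o}<{i}>]+{i}<"],#//mvtr (cell input) (cell output): will add the value at (cell input) to (cell output) and leave (cell input) set to 0
-- ["mvab i a b","{i}>-[-{i}<{a}>+{a}<{b}>+{b}<{i}>]+{i}<"],#//mvab (cell input) (cell output a) (cell output b): will add the value at (cell input) to (cell output a) and (cell output b), leaves (cell input) set to 0
-- ["getcharneq store comp w","{store}>[-]+{store}<{w}>,{comp}-[{w}<{store}>+{store}<{w}>[-]]+{w}<"],#//getcharneq (cell store) (comp) (cell w): gets input char, if input char is not equal to (comp) sets (cell store) to 1, otherwise sets (cell store) to 0, uses (cell w) for temporary calculation memory allocation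
-- ["mult a b o w","{a}>-[+{a}<{b}>-[-{b}<{o}>+{o}<{w}>+{w}<{b}>]+{b}<{w}>-[-{w}<{b}>+{b}<{w}>]+{w}<{a}>--]+{a}<"],#//mult (cell input a) (cell input b) (cell output) (cell w): sets (cell output) to product of (cell input a) and (cell input b), sets (cell input a) to 0 and preserves (cell input b), uses (cell w) for temporary calculation memory allocation
-- ["printcell c","{c}>-.+{c}<"],#//printcell (cell): prints character at (cell)
-- ["startprintcell c","{c}>-.+"],#//startprintcell (cell): prints character at (cell) without returning to cell 0, use printnext to continue, use endprint to finish
-- ["printnext",">-.+"],#//printnext: prints next character in memory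
-- ["endprint","[<]"],#//endprint: ends print sequence
-- ["printuntil c comp","{c}>{comp}--[{comp}++-.+>{comp}--]{comp}++<[<]"],#//printuntil (cell) (comp): print all characters starting from (cell) until first next cell equal to (comp); (comp) must be less than all characters in sequence, (comp) = 0 is recommended
-- ["RAW_PLUS x","{x}+"],
-- ["RAW_MINUS x","{x}-"],
-- ["RAW_LEFT x","{x}<"],
-- ["RAW_RIGHT x","{x}>"],
-- ["RAW_OPBR x","{x}["],
-- ["RAW_CLBR x","{x}]"],
-- ["RAW_DOT x","{x}."],
-- ["RAW_COMMA x","{x},"]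
-- ];
--
-- def getrepldct(line):
--     ls = line.split(" ");
--     rs = -1;
--     i = 0;
--     j = 0;
--     for i in range(len(repldct)):
--         if(ls[0]==repldct[i][0].split(" ")[0]):
--             rs = i;
--             break;
--     if(rs==-1):
--         return "";
--     else:
--         ref = repldct[rs][0].split(' ');
--         str = repldct[rs][1];
--         newstr = "";
--         brm = False;
--         br = "";
--         amt = 1;
--         for i in range(len(str)):
--             if(brm):
--                 if(str[i]=="}"):
--                     brm=False;
--                     for j in range(1, len(ref)):
--                         if(br==ref[j]):
--                             amt = int(ls[j]);
--                 else:
--                     br+=str[i];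
--             else:
--                 if(str[i]=="{"):
--                     brm=True;
--                     br = "";
--                 else:
--                     for j in range(amt):
--                         newstr+=str[i];
--                     amt = 1;
--         return newstr;
-- ===== SOURCE B (Python) =====
-- repldct = [
-- ["setup n",">-<{n}><+[<+]+<"],
-- ["set c x","{c}>[-]+{x}+{c}<"],
-- ["mvr c","{c}>"],
-- ["dec c x","{c}>{x}-{c}<"],
-- ["inc c x","{c}>{x}+{c}<"],
-- ["goto c","[<]{c}>"],
-- ["gotof_ncz c","<[<]{c}>"],
-- ["mv i o","{o}>[-]+{o}<{i}>-[-{i}<{o}>+{o}<{i}>]+{i}<"],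
-- ["printaz char","{char}+.[-]"],
-- ["printanz char","{char}+.[-]+"],
-- ["getchar store","{store}>,+{store}<"],
-- ["loop x","{x}>-[+{x}<"],
-- ["endloop x","{x}>-]+{x}<"],
-- ["if x","{x}>-[+{x}<"],
-- ["endif x","{x}>[-]]+{x}<"],
-- ["inv ct cs w","{cs}>[-]++{cs}<{w}>[-]+{w}<{ct}>-[+{ct}<{w}>[-]++{w}<{cs}>[-]+{cs}<{ct}>[-]][-]+{ct}<{w}>-[-{w}<{ct}>+{ct}<{w}>]+{w}<"],
-- ["mvtr i o","{i}>-[-{i}<{o}>+{o}<{i}>]+{i}<"],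
-- ["mvab i a b","{i}>-[-{i}<{a}>+{a}<{b}>+{b}<{i}>]+{i}<"],
-- ["getcharneq store comp w","{store}>[-]+{store}<{w}>,{comp}-[{w}<{store}>+{store}<{w}>[-]]+{w}<"],
-- ["mult a b o w","{a}>-[+{a}<{b}>-[-{b}<{o}>+{o}<{w}>+{w}<{b}>]+{b}<{w}>-[-{w}<{b}>+{b}<{w}>]+{w}<{a}>--]+{a}<"],
-- ["printcell c","{c}>-.+{c}<"],
-- ["startprintcell c","{c}>-.+"],
-- ["printnext",">-.+"],
-- ["endprint","[<]"],
-- ["printuntil c comp","{c}>{comp}--[{comp}++-.+>{comp}--]{comp}++<[<]"],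
-- ["RAW_PLUS x","{x}+"],
-- ["RAW_MINUS x","{x}-"],
-- ["RAW_LEFT x","{x}<"],
-- ["RAW_RIGHT x","{x}>"],
-- ["RAW_OPBR x","{x}["],
-- ["RAW_CLBR x","{x}]"],
-- ["RAW_DOT x","{x}."],
-- ["RAW_COMMA x","{x},"]
-- ]
--
-- def getrepldct(line):
--     ls = line.split(" ")
--     for spec, template in repldct:
--         ref = spec.split(" ")
--         if ref[0] == ls[0]:
--             break
--     else:
--         return ""
--     pieces = []
--     amt = 1
--     i = 0
--     while i < len(template):
--         if template[i] == "{":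
--             end = template.index("}", i)
--             name = template[i + 1:end]
--             for j in range(1, len(ref)):
--                 if name == ref[j]:
--                     amt = int(ls[j])
--             i = end + 1
--         else:
--             pieces.append(template[i] * amt)
--             amt = 1
--             i += 1
--     return "".join(pieces)
-- ===== Notes on version B (the rewrite author's own statement) =====
-- stated objective: idiomatic
-- what changed: Replaces A's char-by-char boolean brace state machine (brm flag with a char accumulator and a per-char repeat loop) by a token-jump scan: at an opening brace it jumps straight to the closing brace and slices out the placeholder name, literal chars are emitted as string repetitions collected into a pieces list joined at the end; the table search becomes a for/else over rows returning the matching row itself instead of an index.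
import Mathlib
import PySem

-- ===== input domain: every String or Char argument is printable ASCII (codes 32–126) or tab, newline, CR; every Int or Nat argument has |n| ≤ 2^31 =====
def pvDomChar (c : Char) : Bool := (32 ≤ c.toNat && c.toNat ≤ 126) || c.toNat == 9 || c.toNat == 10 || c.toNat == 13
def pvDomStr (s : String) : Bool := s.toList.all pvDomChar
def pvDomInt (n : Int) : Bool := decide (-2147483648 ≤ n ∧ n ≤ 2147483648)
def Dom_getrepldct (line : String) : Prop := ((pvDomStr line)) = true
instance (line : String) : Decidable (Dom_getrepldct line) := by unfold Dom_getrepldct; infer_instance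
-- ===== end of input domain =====

-- B replaces A's char-by-char brace state machine by a token-jump scan (find the closing
-- brace, slice the placeholder name, emit literal chars by string repetition, join the
-- pieces); objective: a plainer decomposition, not speed.  Equality is about the return value.

-- the module-level macro table, shared context of both programs
def pvRepldct : List (List Char × List Char) := [
  ("setup n".toList, ">-<{n}><+[<+]+<".toList),
  ("set c x".toList, "{c}>[-]+{x}+{c}<".toList),
  ("mvr c".toList, "{c}>".toList),
  ("dec c x".toList, "{c}>{x}-{c}<".toList),
  ("inc c x".toList, "{c}>{x}+{c}<".toList),
  ("goto c".toList, "[<]{c}>".toList),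
  ("gotof_ncz c".toList, "<[<]{c}>".toList),
  ("mv i o".toList, "{o}>[-]+{o}<{i}>-[-{i}<{o}>+{o}<{i}>]+{i}<".toList),
  ("printaz char".toList, "{char}+.[-]".toList),
  ("printanz char".toList, "{char}+.[-]+".toList),
  ("getchar store".toList, "{store}>,+{store}<".toList),
  ("loop x".toList, "{x}>-[+{x}<".toList),
  ("endloop x".toList, "{x}>-]+{x}<".toList),
  ("if x".toList, "{x}>-[+{x}<".toList),
  ("endif x".toList, "{x}>[-]]+{x}<".toList),
  ("inv ct cs w".toList, "{cs}>[-]++{cs}<{w}>[-]+{w}<{ct}>-[+{ct}<{w}>[-]++{w}<{cs}>[-]+{cs}<{ct}>[-]][-]+{ct}<{w}>-[-{w}<{ct}>+{ct}<{w}>]+{w}<".toList),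
  ("mvtr i o".toList, "{i}>-[-{i}<{o}>+{o}<{i}>]+{i}<".toList),
  ("mvab i a b".toList, "{i}>-[-{i}<{a}>+{a}<{b}>+{b}<{i}>]+{i}<".toList),
  ("getcharneq store comp w".toList, "{store}>[-]+{store}<{w}>,{comp}-[{w}<{store}>+{store}<{w}>[-]]+{w}<".toList),
  ("mult a b o w".toList, "{a}>-[+{a}<{b}>-[-{b}<{o}>+{o}<{w}>+{w}<{b}>]+{b}<{w}>-[-{w}<{b}>+{b}<{w}>]+{w}<{a}>--]+{a}<".toList),
  ("printcell c".toList, "{c}>-.+{c}<".toList),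
  ("startprintcell c".toList, "{c}>-.+".toList),
  ("printnext".toList, ">-.+".toList),
  ("endprint".toList, "[<]".toList),
  ("printuntil c comp".toList, "{c}>{comp}--[{comp}++-.+>{comp}--]{comp}++<[<]".toList),
  ("RAW_PLUS x".toList, "{x}+".toList),
  ("RAW_MINUS x".toList, "{x}-".toList),
  ("RAW_LEFT x".toList, "{x}<".toList),
  ("RAW_RIGHT x".toList, "{x}>".toList),
  ("RAW_OPBR x".toList, "{x}[".toList),
  ("RAW_CLBR x".toList, "{x}]".toList),
  ("RAW_DOT x".toList, "{x}.".toList),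
  ("RAW_COMMA x".toList, "{x},".toList)]

-- ===== PORT A =====
-- A's first loop: for i in range(len(repldct)): if ls[0]==repldct[i][0].split(" ")[0]: rs=i; break
def pvFindA (ls0 : List Char) : List (List Char × List Char) → Int → Int
  | [], _ => -1
  | (spec, _) :: rest, i =>
      if ls0 = (PySem.Chars.splitOn spec [' ']).headD [] then i else pvFindA ls0 rest (i + 1)

-- A's inner loop: for j in range(1, len(ref)): if br==ref[j]: amt = int(ls[j])
-- (int(ls[j]) may raise in Python: the `none` of pyGet?/ofChars? is excluded by Pre_, getD keeps amt)
def pvInnerA (ref ls : List (List Char)) (br : List Char) (amt : Int) : Int :=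
  (PySem.List.pyRange 1 (ref.length : Int) 1).foldl
    (fun a j => if br = (PySem.List.pyGet? ref j).getD [] then
        ((PySem.List.pyGet? ls j).bind PySem.Int.ofChars?).getD a
      else a) amt

-- A's innermost loop: for j in range(amt): newstr += str[i]
def pvRepA (acc : List Char) (c : Char) (amt : Int) : List Char :=
  (PySem.List.pyRange 0 amt 1).foldl (fun a _ => a ++ [c]) acc

-- one iteration of A's main loop, state = (newstr, brm, br, amt)
def pvStepA (ref ls : List (List Char)) (st : List Char × Bool × List Char × Int) (c : Char) :
    List Char × Bool × List Char × Int :=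
  match st with
  | (newstr, brm, br, amt) =>
    if brm then
      if c = '}' then (newstr, false, br, pvInnerA ref ls br amt)
      else (newstr, brm, br ++ [c], amt)
    else
      if c = '{' then (newstr, true, [], amt)
      else (pvRepA newstr c amt, brm, br, 1)

def getrepldct (line : String) : String :=
  let ls := PySem.Chars.splitOn line.toList [' ']
  let rs := pvFindA (ls.headD []) pvRepldct 0
  if rs = -1 then "" else
    match PySem.List.pyGet? pvRepldct rs with
    | none => ""   -- unreachable: rs is a valid index when rs ≠ -1
    | some (spec, tmpl) =>
      let ref := PySem.Chars.splitOn spec [' ']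
      String.ofList (tmpl.foldl (pvStepA ref ls) ([], false, [], 1)).1

-- ===== PORT B =====
-- B's for/else over the rows, breaking with the matching (ref, template)
def pvFindB (ls0 : List Char) : List (List Char × List Char) → Option (List (List Char) × List Char)
  | [] => none
  | (spec, tmpl) :: rest =>
      let ref := PySem.Chars.splitOn spec [' ']
      if ref.headD [] = ls0 then some (ref, tmpl) else pvFindB ls0 rest

-- B's inner loop: for j in range(1, len(ref)): if name == ref[j]: amt = int(ls[j])
def pvInnerB (ref ls : List (List Char)) (name : List Char) (amt : Int) : Int :=
  (PySem.List.pyRange 1 (ref.length : Int) 1).foldl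
    (fun a j => if name = (PySem.List.pyGet? ref j).getD [] then
        ((PySem.List.pyGet? ls j).bind PySem.Int.ofChars?).getD a
      else a) amt

-- B's while loop: jump to the closing brace (template.index("}", i) / slicing), else emit
-- template[i] * amt; the pieces list is joined at the end.  The fuel argument (initially the
-- list length, enough since every step consumes at least one char; fuel-irrelevance is
-- pvExpBAux_fuel below) only makes the recursion structural.
def pvExpBAux (ref ls : List (List Char)) : Nat → List Char → Int → List (List Char)
  | _, [], _ => []
  | 0, _ :: _, _ => []   -- never reached: fuel starts at the list length
  | fuel + 1, c :: rest, amt =>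
    if c = '{' then
      pvExpBAux ref ls fuel ((rest.dropWhile (fun x => decide (x ≠ '}'))).drop 1)
        (pvInnerB ref ls (rest.takeWhile (fun x => decide (x ≠ '}'))) amt)
    else List.replicate amt.toNat c :: pvExpBAux ref ls fuel rest 1

def pvExpB (ref ls : List (List Char)) (cs : List Char) (amt : Int) : List (List Char) :=
  pvExpBAux ref ls cs.length cs amt

def getrepldct_alt (line : String) : String :=
  let ls := PySem.Chars.splitOn line.toList [' ']
  match pvFindB (ls.headD []) pvRepldct with
  | none => ""
  | some (ref, tmpl) => String.ofList (PySem.Chars.join [] (pvExpB ref ls tmpl 1))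

-- ===== PRECONDITION & SPEC =====
-- Pre_ excludes exactly the inputs on which Python A raises: the first word matches a table
-- command but some required argument ls[j] is missing (IndexError) or not int()-parsable
-- (ValueError) — every parameter of a matched command occurs as a placeholder in its template.
def Pre_getrepldct (line : String) : Prop :=
  ∀ p ∈ pvRepldct,
    (PySem.Chars.splitOn p.1 [' ']).headD [] = (PySem.Chars.splitOn line.toList [' ']).headD [] →
    ∀ j ∈ List.range (PySem.Chars.splitOn p.1 [' ']).length, 1 ≤ j →
      ((PySem.List.pyGet? (PySem.Chars.splitOn line.toList [' ']) (j : Int)).bind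
        PySem.Int.ofChars?).isSome = true
instance (line : String) : Decidable (Pre_getrepldct line) := by unfold Pre_getrepldct; infer_instance
def pvWitness_getrepldct : String := "mvr 3"

def Spec_getrepldct (line : String) (out : String) : Prop := out = getrepldct_alt line
instance (line : String) (out : String) : Decidable (Spec_getrepldct line out) := by unfold Spec_getrepldct; infer_instance

-- ===== CLAIM (what is proved, stated in full; the proofs are below) =====
def Claim_equal_getrepldct : Prop := ∀ (line : String), Dom_getrepldct line → Pre_getrepldct line → Spec_getrepldct line (getrepldct line)

-- ===== LEMMAS AND PROOFS =====

lemma pvJoin_nil_eq_flatten (ps : List (List Char)) : PySem.Chars.join [] ps = ps.flatten := by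
  induction ps with
  | nil => exact PySem.Chars.join_nil []
  | cons p ps ih =>
    cases ps with
    | nil => simp [PySem.Chars.join_singleton]
    | cons q qs => rw [PySem.Chars.join_cons_cons, ih]; simp

lemma pvInner_eq (ref ls : List (List Char)) (br : List Char) (amt : Int) :
    pvInnerA ref ls br amt = pvInnerB ref ls br amt := rfl

lemma pvRepA_eq (acc : List Char) (c : Char) (amt : Int) :
    pvRepA acc c amt = acc ++ List.replicate amt.toNat c := by
  have hcomm : ∀ m : Nat, c :: List.replicate m c = List.replicate m c ++ [c] := by
    intro m; rw [← List.replicate_succ, List.replicate_succ']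
  have key : ∀ (l : List Int) (a : List Char),
      l.foldl (fun a _ => a ++ [c]) a = a ++ List.replicate l.length c := by
    intro l
    induction l with
    | nil => simp
    | cons x xs ih =>
      intro a
      rw [List.foldl_cons, ih, List.append_assoc, List.singleton_append, hcomm,
        ← List.append_assoc, List.length_cons, List.replicate_succ', ← List.append_assoc]
  unfold pvRepA
  rw [key, PySem.List.length_pyRange_one]
  simp

lemma pvDropNoBrace (br : List Char) (hbr : '}' ∉ br) :
    List.dropWhile (fun x => decide (x ≠ '}')) br = [] :=
  List.dropWhile_eq_nil_iff.2 (fun _ hx => decide_eq_true (fun he => hbr (he ▸ hx)))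

lemma pvTakeBrace (rest br : List Char) (hbr : '}' ∉ br) :
    List.takeWhile (fun x => decide (x ≠ '}')) (br ++ '}' :: rest) = br := by
  induction br with
  | nil =>
    rw [List.nil_append, List.takeWhile_cons, if_neg]
    simp
  | cons b bs ihb =>
    have hb : b ≠ '}' := fun h => hbr (h ▸ List.mem_cons_self ..)
    rw [List.cons_append, List.takeWhile_cons,
      if_pos (show (fun x => decide (x ≠ '}')) b = true from decide_eq_true hb),
      ihb (fun h => hbr (List.mem_cons_of_mem _ h))]

lemma pvDropBrace (rest br : List Char) (hbr : '}' ∉ br) :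
    List.dropWhile (fun x => decide (x ≠ '}')) (br ++ '}' :: rest) = '}' :: rest := by
  induction br with
  | nil =>
    rw [List.nil_append, List.dropWhile_cons, if_neg]
    simp
  | cons b bs ihb =>
    have hb : b ≠ '}' := fun h => hbr (h ▸ List.mem_cons_self ..)
    rw [List.cons_append, List.dropWhile_cons,
      if_pos (show (fun x => decide (x ≠ '}')) b = true from decide_eq_true hb),
      ihb (fun h => hbr (List.mem_cons_of_mem _ h))]

-- the fuel does not matter as long as it covers the list length
lemma pvExpBAux_fuel (ref ls : List (List Char)) :
    ∀ (f1 : Nat) (cs : List Char) (f2 : Nat) (amt : Int), cs.length ≤ f1 → cs.length ≤ f2 →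
      pvExpBAux ref ls f1 cs amt = pvExpBAux ref ls f2 cs amt := by
  intro f1
  induction f1 with
  | zero =>
    intro cs f2 amt h1 _
    have : cs = [] := List.eq_nil_of_length_eq_zero (Nat.le_zero.1 h1)
    subst this
    cases f2 <;> rfl
  | succ f ih =>
    intro cs f2 amt h1 h2
    cases cs with
    | nil => cases f2 <;> rfl
    | cons c rest =>
      cases f2 with
      | zero => simp at h2
      | succ f2' =>
        simp only [List.length_cons, Nat.add_le_add_iff_right] at h1 h2
        simp only [pvExpBAux]
        by_cases hc : c = '{'
        · rw [if_pos hc, if_pos hc]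
        
          have hl : ((rest.dropWhile (fun x => decide (x ≠ '}'))).drop 1).length
              ≤ rest.length := by
            have := List.length_dropWhile_le (fun x => decide (x ≠ '}')) rest
            rw [List.length_drop]
            omega
          exact ih _ f2' _ (le_trans hl h1) (le_trans hl h2)
        · rw [if_neg hc, if_neg hc, ih rest f2' 1 h1 h2]

-- unfolding equations for B's token scan, in rewrite-friendly form
lemma pvExpB_nil (ref ls : List (List Char)) (amt : Int) : pvExpB ref ls [] amt = [] := rfl

lemma pvExpB_lit (ref ls : List (List Char)) (c : Char) (rest : List Char) (amt : Int)
    (hc : c ≠ '{') :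
    pvExpB ref ls (c :: rest) amt = List.replicate amt.toNat c :: pvExpB ref ls rest 1 := by
  unfold pvExpB
  simp only [List.length_cons, pvExpBAux]
  rw [if_neg hc]

lemma pvExpB_brace (ref ls : List (List Char)) (rest : List Char) (amt : Int) :
    pvExpB ref ls ('{' :: rest) amt
      = pvExpB ref ls ((rest.dropWhile (fun x => decide (x ≠ '}'))).drop 1)
          (pvInnerB ref ls (rest.takeWhile (fun x => decide (x ≠ '}'))) amt) := by
  unfold pvExpB
  simp only [List.length_cons, pvExpBAux, if_true]
  have hl : ((rest.dropWhile (fun x => decide (x ≠ '}'))).drop 1).length ≤ rest.length := by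
    have := List.length_dropWhile_le (fun x => decide (x ≠ '}')) rest
    rw [List.length_drop]
    omega
  exact pvExpBAux_fuel ref ls rest.length _ _ _ hl le_rfl

-- the heart: A's state machine over the template = B's token-jump scan
lemma pvExpand (ref ls : List (List Char)) (cs : List Char) :
    (∀ s br amt, (cs.foldl (pvStepA ref ls) (s, false, br, amt)).1
        = s ++ (pvExpB ref ls cs amt).flatten)
    ∧ (∀ s br amt, '}' ∉ br →
        (cs.foldl (pvStepA ref ls) (s, true, br, amt)).1
        = s ++ (pvExpB ref ls ('{' :: (br ++ cs)) amt).flatten) := by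
  induction cs with
  | nil =>
    constructor
    · intro s br amt
      rw [List.foldl_nil, pvExpB_nil, List.flatten_nil, List.append_nil]
    · intro s br amt hbr
      rw [List.foldl_nil, List.append_nil, pvExpB_brace, pvDropNoBrace br hbr,
        List.drop_nil, pvExpB_nil, List.flatten_nil, List.append_nil]
  | cons c rest ih =>
    constructor
    · intro s br amt
      by_cases hc : c = '{'
      · subst hc
        rw [List.foldl_cons]
        show (rest.foldl (pvStepA ref ls) (s, true, [], amt)).1 = _
        have h2 := ih.2 s [] amt (by simp)
        rw [List.nil_append] at h2
        exact h2
      · rw [List.foldl_cons]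
        rw [show pvStepA ref ls (s, false, br, amt) c = (pvRepA s c amt, false, br, 1) by
          simp [pvStepA, hc]]
        rw [ih.1 (pvRepA s c amt) br 1, pvExpB_lit ref ls c rest amt hc, pvRepA_eq,
          List.flatten_cons, List.append_assoc]
    · intro s br amt hbr
      by_cases hc : c = '}'
      · subst hc
        rw [List.foldl_cons]
        rw [show pvStepA ref ls (s, true, br, amt) '}'
            = (s, false, br, pvInnerA ref ls br amt) by simp [pvStepA]]
        rw [ih.1 s br (pvInnerA ref ls br amt), pvExpB_brace,
          pvTakeBrace rest br hbr, pvDropBrace rest br hbr, List.drop_succ_cons,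
          List.drop_zero, pvInner_eq]
      · rw [List.foldl_cons]
        rw [show pvStepA ref ls (s, true, br, amt) c = (s, true, br ++ [c], amt) by
          simp [pvStepA, hc]]
        have hbr' : '}' ∉ br ++ [c] := by
          intro hmem
          rcases List.mem_append.1 hmem with h | h
          · exact hbr h
          · exact hc (List.mem_singleton.1 h).symm
        rw [ih.2 s (br ++ [c]) amt hbr', List.append_assoc, List.singleton_append]

-- A's index-returning search agrees with B's row-returning search
lemma pvFind_agree (ls0 : List Char) :
    ∀ (t : List (List Char × List Char)) (i : Int), 0 ≤ i →
      (pvFindA ls0 t i = -1 → pvFindB ls0 t = none) ∧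
      (pvFindA ls0 t i ≠ -1 → ∃ k : Nat, pvFindA ls0 t i = i + k ∧
        ∃ spec tmpl, t[k]? = some (spec, tmpl) ∧
          pvFindB ls0 t = some (PySem.Chars.splitOn spec [' '], tmpl)) := by
  intro t
  induction t with
  | nil => intro i _; exact ⟨fun _ => rfl, fun h => absurd rfl h⟩
  | cons p rest ih =>
    intro i hi
    obtain ⟨spec, tmpl⟩ := p
    by_cases hm : ls0 = (PySem.Chars.splitOn spec [' ']).headD []
    · have hFA : pvFindA ls0 ((spec, tmpl) :: rest) i = i := by
        unfold pvFindA; rw [if_pos hm]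
      have hFB : pvFindB ls0 ((spec, tmpl) :: rest)
          = some (PySem.Chars.splitOn spec [' '], tmpl) := by
        unfold pvFindB; rw [if_pos hm.symm]
      constructor
      · intro h; rw [hFA] at h; omega
      · intro _
        exact ⟨0, by rw [hFA]; simp, spec, tmpl, by simp, hFB⟩
    · have hFA : pvFindA ls0 ((spec, tmpl) :: rest) i = pvFindA ls0 rest (i + 1) := by
        unfold pvFindA; rw [if_neg hm, pvFindA.eq_def]
      have hFB : pvFindB ls0 ((spec, tmpl) :: rest) = pvFindB ls0 rest := by
        unfold pvFindB; rw [if_neg (fun h => hm h.symm), pvFindB.eq_def]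
      obtain ⟨h1, h2⟩ := ih (i + 1) (by omega)
      constructor
      · intro h; rw [hFB]; exact h1 (hFA ▸ h)
      · intro h
        obtain ⟨k, hk, spec', tmpl', hget, hfb⟩ := h2 (hFA ▸ h)
        exact ⟨k + 1, by rw [hFA, hk]; push_cast; ring, spec', tmpl',
          by simpa using hget, hFB ▸ hfb⟩

-- ===== VERDICT (by name: the statement is the Claim_ definition above) =====
theorem getrepldct_spec : Claim_equal_getrepldct := by
  intro line _ _
  simp only [Spec_getrepldct, getrepldct, getrepldct_alt]
  generalize PySem.Chars.splitOn line.toList [' '] = ls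
  by_cases h : pvFindA (ls.headD []) pvRepldct 0 = -1
  · have hB : pvFindB (ls.headD []) pvRepldct = none :=
      (pvFind_agree (ls.headD []) pvRepldct 0 (by omega)).1 h
    rw [if_pos h, hB]
  · obtain ⟨k, hk, spec, tmpl, hget, hfb⟩ :=
      (pvFind_agree (ls.headD []) pvRepldct 0 (by omega)).2 h
    have hk' : pvFindA (ls.headD []) pvRepldct 0 = (k : Int) := by omega
    have hpg : PySem.List.pyGet? pvRepldct (pvFindA (ls.headD []) pvRepldct 0)
        = some (spec, tmpl) := by
      rw [hk', PySem.List.pyGet?_natCast, hget]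
    rw [if_neg h, hpg, hfb]
    dsimp only []
    have hx := (pvExpand (PySem.Chars.splitOn spec [' ']) ls tmpl).1 [] [] 1
    rw [List.nil_append] at hx
    rw [pvJoin_nil_eq_flatten, hx]
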